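-- pv_equiv track=rewrite | github.com/edt-yxz-zzd/python3_src | seed/math/discrete_logarithm.py | _cut__num_blocks_
-- ===== SOURCE A (Python) =====
-- def _cut__num_blocks_(num_blocks, n, /):
--     assert num_blocks >= 0
--     assert n >= 0
--     assert (n == 0) is (num_blocks == 0)
--     if num_blocks == 0:
--         ps = []
--     else:
--         sz0, num1 = divmod(n, num_blocks)
--         sz1 = sz0+1
--         num0 = num_blocks-num1
--         assert sz0*num0 +sz1*num1 == n
--         max_sz_per_block = (n-1)//num_blocks +1
--         assert max(max_sz_per_block*(num_blocks-1), (max_sz_per_block-1)*num_blocks) < n <= max_sz_per_block*num_blocks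
--         assert num0 + num1 == num_blocks == (n-1)//max_sz_per_block +1
--         assert 0 < sz0 < sz1 == max_sz_per_block if num1 else 0 < sz0 == max_sz_per_block < sz1
--         ps = [(num0, sz0), (num1, sz1)]
--             # num1 may be 0
--     begin = 0
--     for numX, szX in ps:
--         for _ in range(numX):
--             yield begin, szX
--             begin += szX
--     return
-- ===== SOURCE B (Python) =====
-- def _cut__num_blocks_(num_blocks, n, /):
--     assert num_blocks >= 0
--     assert n >= 0
--     assert (n == 0) is (num_blocks == 0)
--     if num_blocks == 0:
--         return
--     sz0, num1 = divmod(n, num_blocks)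
--     sz1 = sz0 + 1
--     num0 = num_blocks - num1
--     for i in range(num_blocks):
--         if i < num0:
--             yield i * sz0, sz0
--         else:
--             yield num0 * sz0 + (i - num0) * sz1, sz1
-- ===== Notes on version B (the rewrite author's own statement) =====
-- stated objective: alternative
-- what changed: Replaces A's grouped two-level loop (outer over the two (count,size) groups, inner carrying a running begin accumulator) with a single flat loop over range(num_blocks) that computes each block's begin by a closed-form formula from its index.
import Mathlib
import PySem

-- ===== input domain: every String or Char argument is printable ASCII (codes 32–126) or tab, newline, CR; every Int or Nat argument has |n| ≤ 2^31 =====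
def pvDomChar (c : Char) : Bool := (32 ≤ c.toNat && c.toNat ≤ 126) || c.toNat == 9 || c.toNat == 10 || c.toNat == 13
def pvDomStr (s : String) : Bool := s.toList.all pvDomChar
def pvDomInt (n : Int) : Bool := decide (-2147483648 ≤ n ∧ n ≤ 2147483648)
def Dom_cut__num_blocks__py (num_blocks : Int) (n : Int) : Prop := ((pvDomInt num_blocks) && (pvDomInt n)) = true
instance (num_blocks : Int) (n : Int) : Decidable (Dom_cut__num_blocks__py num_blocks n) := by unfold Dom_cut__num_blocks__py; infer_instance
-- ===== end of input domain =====

-- B replaces A's grouped accumulator walk (two nested loops carrying a running `begin`)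
-- by one flat index loop computing each block's begin in closed form (objective: alternative).
-- Both Pythons are generators; equivalence is about the produced sequence of pairs.

-- ===== PORT A =====
-- literal transliteration of A: build ps, then for (numX, szX) in ps: for _ in range(numX): yield begin, szX; begin += szX
def cut__num_blocks__py (num_blocks : Int) (n : Int) : List (Int × Int) :=
  let ps : List (Int × Int) :=
    if num_blocks == 0 then []
    else
      let sz0 := PySem.Int.floordiv n num_blocks
      let num1 := PySem.Int.mod n num_blocks
      let sz1 := sz0 + 1
      let num0 := num_blocks - num1
      [(num0, sz0), (num1, sz1)]
  let res := ps.foldl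
    (fun (st : List (Int × Int) × Int) p =>
      (PySem.List.pyRange 0 p.1 1).foldl
        (fun st _ => (st.1 ++ [(st.2, p.2)], st.2 + p.2)) st)
    ([], 0)
  res.1

-- ===== PORT B =====
-- literal transliteration of B: one flat loop over range(num_blocks), begins by closed form
def cut__num_blocks__py_alt (num_blocks : Int) (n : Int) : List (Int × Int) :=
  if num_blocks == 0 then []
  else
    let sz0 := PySem.Int.floordiv n num_blocks
    let num1 := PySem.Int.mod n num_blocks
    let sz1 := sz0 + 1
    let num0 := num_blocks - num1
    (PySem.List.pyRange 0 num_blocks 1).map (fun i =>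
      if i < num0 then (i * sz0, sz0)
      else (num0 * sz0 + (i - num0) * sz1, sz1))

-- ===== PRECONDITION & SPEC =====
-- Pre_ excludes exactly the inputs where Python A raises AssertionError: negative arguments,
-- (n = 0) xor (num_blocks = 0), and the inputs where A's internal sanity asserts fire
-- (n < num_blocks, i.e. sz0 = 0, or a split whose block sizes cannot satisfy
-- the max_sz_per_block check, i.e. n % num_blocks ≠ 0 and n//num_blocks + n%num_blocks < num_blocks).
def Pre_cut__num_blocks__py (num_blocks : Int) (n : Int) : Prop :=
  (num_blocks = 0 ∧ n = 0) ∨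
  (1 ≤ num_blocks ∧ num_blocks ≤ n ∧
    (PySem.Int.mod n num_blocks = 0 ∨
     num_blocks ≤ PySem.Int.floordiv n num_blocks + PySem.Int.mod n num_blocks))
instance (num_blocks : Int) (n : Int) : Decidable (Pre_cut__num_blocks__py num_blocks n) := by
  unfold Pre_cut__num_blocks__py; infer_instance

def pvWitness_cut__num_blocks__py : Int × Int := (3, 7)

def Spec_cut__num_blocks__py (num_blocks : Int) (n : Int) (out : List (Int × Int)) : Prop :=
  out = cut__num_blocks__py_alt num_blocks n
instance (num_blocks : Int) (n : Int) (out : List (Int × Int)) :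
    Decidable (Spec_cut__num_blocks__py num_blocks n out) := by
  unfold Spec_cut__num_blocks__py; infer_instance

-- ===== CLAIM (what is proved, stated in full; the proofs are below) =====
def Claim_equal_cut__num_blocks__py : Prop :=
  ∀ (num_blocks : Int) (n : Int), Dom_cut__num_blocks__py num_blocks n →
    Pre_cut__num_blocks__py num_blocks n →
    Spec_cut__num_blocks__py num_blocks n (cut__num_blocks__py num_blocks n)

-- ===== LEMMAS AND PROOFS =====

-- A's inner 'for _ in range(numX)' loop, characterised: it appends length-many pairs
-- with begins b, b+sz, …, and leaves begin at b + length*sz.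
theorem pvInner (sz : Int) (l : List Int) :
    ∀ (acc : List (Int × Int)) (b : Int),
      l.foldl (fun (st : List (Int × Int) × Int) (_ : Int) =>
          (st.1 ++ [(st.2, sz)], st.2 + sz)) (acc, b)
      = (acc ++ (List.range l.length).map (fun (j : Nat) => (b + (j : Int) * sz, sz)),
         b + (l.length : Int) * sz) := by
  induction l with
  | nil => intro acc b; simp
  | cons x xs ih =>
    intro acc b
    simp only [List.foldl_cons, ih, List.length_cons, List.range_succ_eq_map,
      List.map_cons, List.map_map, List.append_assoc, List.singleton_append,
      Prod.mk.injEq, Nat.cast_zero, mul_zero, add_zero]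
    constructor
    · congr 1
      congr 1
      · norm_num
      · apply List.map_congr_left
        intro j _
        simp only [Function.comp, Prod.mk.injEq, and_true]
        push_cast; ring
    · push_cast; ring

theorem pvB_split (num_blocks n : Int) (h1 : 1 ≤ num_blocks) :
    cut__num_blocks__py_alt num_blocks n
    = (let sz0 := PySem.Int.floordiv n num_blocks
       let num1 := PySem.Int.mod n num_blocks
       let num0 := num_blocks - num1
       ((List.range num0.toNat).map (fun (j : Nat) => ((j : Int) * sz0, sz0))
        ++ (List.range num1.toNat).map
            (fun (j : Nat) => (num0 * sz0 + (j : Int) * (sz0 + 1), sz0 + 1)))) := by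
  have hnb : ¬ (num_blocks == 0) = true := by simp; omega
  have hmod0 : 0 ≤ PySem.Int.mod n num_blocks := by
    rw [PySem.Int.mod_eq_emod_of_pos (by omega : (0:Int) < num_blocks)]
    exact Int.emod_nonneg n (by omega)
  have hmodlt : PySem.Int.mod n num_blocks < num_blocks := by
    rw [PySem.Int.mod_eq_emod_of_pos (by omega : (0:Int) < num_blocks)]
    exact Int.emod_lt_of_pos n (by omega)
  unfold cut__num_blocks__py_alt
  rw [if_neg hnb]
  set sz0 := PySem.Int.floordiv n num_blocks with hsz0
  set num1 := PySem.Int.mod n num_blocks with hnum1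
  set num0 := num_blocks - num1 with hnum0
  have hsplit : PySem.List.pyRange 0 num_blocks 1
      = PySem.List.pyRange 0 num0 1 ++ PySem.List.pyRange num0 num_blocks 1 :=
    PySem.List.pyRange_one_append 0 num0 num_blocks (by omega) (by omega)
  rw [hsplit, List.map_append]
  congr 1
  · rw [PySem.List.pyRange_one, List.map_map]
    have hlen : (num0 - 0).toNat = num0.toNat := by omega
    rw [hlen]
    apply List.map_congr_left
    intro j hj
    rw [List.mem_range] at hj
    simp only [Function.comp, zero_add]
    rw [if_pos (show (j : Int) < num0 by omega)]
  · rw [PySem.List.pyRange_one, List.map_map]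
    have hlen : (num_blocks - num0).toNat = num1.toNat := by omega
    rw [hlen]
    apply List.map_congr_left
    intro j hj
    simp only [Function.comp]
    rw [if_neg (show ¬ (num0 + (j : Int) < num0) by omega)]
    simp only [Prod.mk.injEq, and_true]
    ring

-- ===== VERDICT (by name: the statement is the Claim_ definition above) =====
theorem cut__num_blocks__py_spec : Claim_equal_cut__num_blocks__py := by
  intro num_blocks n _ hpre
  unfold Spec_cut__num_blocks__py
  by_cases h0 : num_blocks = 0
  · subst h0
    unfold cut__num_blocks__py cut__num_blocks__py_alt
    simp
  · have h1 : 1 ≤ num_blocks := by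
      rcases hpre with ⟨h, _⟩ | ⟨h, _⟩
      · exact absurd h h0
      · exact h
    have hmod0 : 0 ≤ PySem.Int.mod n num_blocks := by
      rw [PySem.Int.mod_eq_emod_of_pos (by omega : (0:Int) < num_blocks)]
      exact Int.emod_nonneg n (by omega)
    have hmodlt : PySem.Int.mod n num_blocks < num_blocks := by
      rw [PySem.Int.mod_eq_emod_of_pos (by omega : (0:Int) < num_blocks)]
      exact Int.emod_lt_of_pos n (by omega)
    rw [pvB_split num_blocks n h1]
    unfold cut__num_blocks__py
    have hnb : ¬ (num_blocks == 0) = true := by simp; omega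
    rw [if_neg hnb]
    simp only [List.foldl_cons, List.foldl_nil]
    rw [pvInner, pvInner]
    simp only
    set sz0 := PySem.Int.floordiv n num_blocks with hsz0
    set num1 := PySem.Int.mod n num_blocks with hnum1
    set num0 := num_blocks - num1 with hnum0
    have hlen0 : (PySem.List.pyRange 0 num0 1).length = num0.toNat := by
      rw [PySem.List.length_pyRange_one]; congr 1; omega
    have hlen1 : (PySem.List.pyRange 0 num1 1).length = num1.toNat := by
      rw [PySem.List.length_pyRange_one]; congr 1; omega
    rw [hlen0, hlen1]
    have hcast : ((num0.toNat : Int)) = num0 := by omega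
    congr 1
    · apply List.map_congr_left; intro j _; simp [zero_add]
    · apply List.map_congr_left; intro j _
      rw [zero_add, hcast]
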